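-- pv_equiv track=rewrite | github.com/chaofanwang123/My-Hackerrank-Solutions-Python- | Goodland Electricity.py | pylons
-- ===== SOURCE A (Python) =====
-- import bisect
--
-- def pylons(k, arr):
--     n=len(arr)
--     List=[]
--     for i in range(n):
--         if arr[i]==1:
--            List.append(i)
--     end=-1
--     ans=0
--     istart=0
--     while end<n-1:
--         index=bisect.bisect_right(List,end+k,istart)-1
--         if index<0:
--             return -1
--         istart=index
--         ans+=1
--         end1=List[index]+(k-1)
--         if end1==end:
--             return -1
--         end=end1
--     return ans
-- ===== SOURCE B (Python) =====
-- def pylons(k, arr):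
--     n = len(arr)
--     covered = 0
--     ans = 0
--     while covered < n:
--         hi = min(n - 1, covered + k - 1)
--         lo = max(0, covered - k + 1)
--         j = None
--         for t in range(hi, lo - 1, -1):
--             if arr[t] == 1:
--                 j = t
--                 break
--         if j is None:
--             return -1
--         ans += 1
--         covered = j + k
--     return ans
-- ===== Notes on version B (the rewrite author's own statement) =====
-- stated objective: simpler
-- what changed: Replaces A's precomputed list of one-positions plus bisect binary search and a moving list index with a single coverage cursor that repeatedly scans the raw array window [covered-k+1, covered+k-1] downward for the rightmost pylon.
import Mathlib
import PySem

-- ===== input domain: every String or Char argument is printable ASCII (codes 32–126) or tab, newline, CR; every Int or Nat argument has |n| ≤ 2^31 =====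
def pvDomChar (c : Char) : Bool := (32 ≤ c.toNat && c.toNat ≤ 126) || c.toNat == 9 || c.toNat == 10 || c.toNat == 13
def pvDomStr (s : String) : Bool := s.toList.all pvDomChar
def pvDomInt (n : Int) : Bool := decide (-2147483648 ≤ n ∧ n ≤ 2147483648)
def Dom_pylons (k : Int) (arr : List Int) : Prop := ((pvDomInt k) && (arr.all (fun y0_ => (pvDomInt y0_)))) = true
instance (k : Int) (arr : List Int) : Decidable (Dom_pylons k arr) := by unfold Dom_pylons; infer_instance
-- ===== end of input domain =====

-- B replaces A's precomputed one-position list + bisect with a single cursor and a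
-- downward window scan of the raw array (objective: simpler; same return value everywhere).

-- ===== PORT A =====
-- hand port of bisect.bisect_right(l, x, lo): exact for the nondecreasing lists A passes to it
def pylonsBisect (l : List Int) (x : Int) (lo : Nat) : Nat :=
  lo + ((l.drop lo).takeWhile (fun e => decide (e ≤ x))).length

-- A's while loop; the fuel argument is only a totality guard (one extra unit per loop entry;
-- on the runs A performs, `end` strictly increases each iteration, so fuel n+1 is never exhausted)
def pylonsLoopA (k n : Int) (L : List Int) : Nat → Int → Nat → Int → Int
  | 0, _, _, _ => 0
  | fuel + 1, e, istart, ans =>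
    if e < n - 1 then
      let b := pylonsBisect L (e + k) istart
      if (b : Int) - 1 < 0 then -1
      else
        let end1 := PySem.List.pyGetD L ((b : Int) - 1) 0 + (k - 1)
        if end1 = e then -1
        else pylonsLoopA k n L fuel end1 (b - 1) (ans + 1)
    else ans

def pylons (k : Int) (arr : List Int) : Int :=
  let n : Int := arr.length
  let L := (PySem.List.pyRange 0 n 1).foldl
    (fun acc i => if PySem.List.pyGetD arr i 0 = 1 then acc ++ [i] else acc) []
  pylonsLoopA k n L (arr.length + 1) (-1) 0 0

-- ===== PORT B =====
-- B's while loop; the inner `for t in range(hi, lo-1, -1): if …: break` is find? on the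
-- descending range; fuel is the same totality guard (covered strictly increases each iteration)
def pylonsLoopB (k n : Int) (p : Int → Bool) : Nat → Int → Int → Int
  | 0, _, _ => 0
  | fuel + 1, covered, ans =>
    if covered < n then
      let hi := min (n - 1) (covered + k - 1)
      let lo := max 0 (covered - k + 1)
      match (PySem.List.pyRange hi (lo - 1) (-1)).find? p with
      | none => -1
      | some j => pylonsLoopB k n p fuel (j + k) (ans + 1)
    else ans

def pylons_alt (k : Int) (arr : List Int) : Int :=
  pylonsLoopB k arr.length (fun t => decide (PySem.List.pyGetD arr t 0 = 1))
    (arr.length + 1) 0 0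

-- ===== PRECONDITION & SPEC =====
def Spec_pylons (k : Int) (arr : List Int) (out : Int) : Prop := out = pylons_alt k arr
instance (k : Int) (arr : List Int) (out : Int) : Decidable (Spec_pylons k arr out) := by unfold Spec_pylons; infer_instance

-- ===== CLAIM (what is proved, stated in full; the proofs are below) =====
def Claim_equal_pylons : Prop := ∀ (k : Int) (arr : List Int), Dom_pylons k arr → Spec_pylons k arr (pylons k arr)

-- ===== LEMMAS AND PROOFS =====

theorem tw_len_le {α : Type} (q : α → Bool) (l : List α) :
    (l.takeWhile q).length ≤ l.length := by
  induction l with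
  | nil => simp
  | cons a t ih =>
    by_cases h : q a = true <;> simp [List.takeWhile_cons, h] <;> omega

theorem tw_getElem {α : Type} (q : α → Bool) (l : List α) (i : Nat)
    (h : i < (l.takeWhile q).length) :
    (l.takeWhile q)[i] = l[i]'(lt_of_lt_of_le h (tw_len_le q l)) := by
  induction l generalizing i with
  | nil => simp at h
  | cons a t ih =>
    by_cases hq : q a = true
    · cases i with
      | zero => simp [List.takeWhile_cons, hq]
      | succ i =>
        have h' : i < (t.takeWhile q).length := by
          simpa [List.takeWhile_cons, hq] using h
        simpa [List.takeWhile_cons, hq] using ih i h'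
    · simp [List.takeWhile_cons, hq] at h

theorem tw_stop {α : Type} (q : α → Bool) (l : List α)
    (h : (l.takeWhile q).length < l.length) :
    q (l[(l.takeWhile q).length]'h) = false := by
  induction l with
  | nil => simp at h
  | cons a t ih =>
    by_cases hq : q a = true
    · have h' : (t.takeWhile q).length < t.length := by
        simpa [List.takeWhile_cons, hq] using h
      simpa [List.takeWhile_cons, hq] using ih h'
    · simp only [List.takeWhile_cons, if_neg hq, List.length_nil, List.getElem_cons_zero]
      simpa using hq

theorem tw_stop' {α : Type} (q : α → Bool) (l : List α) (i : Nat)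
    (hi : i = (l.takeWhile q).length) (h : i < l.length) :
    q (l[i]'h) = false := by
  subst hi; exact tw_stop q l h

theorem findDesc_none_iff (p : Int → Bool) :
    ∀ (c : Nat) (a b : Int), (a - b).toNat = c →
      ((PySem.List.pyRange a b (-1)).find? p = none ↔
        ∀ t : Int, b < t → t ≤ a → p t = false) := by
  intro c
  induction c with
  | zero =>
    intro a b hc
    rw [PySem.List.pyRange_neg_one_eq_nil (by omega)]
    constructor
    · intro _ t ht1 ht2; omega
    · intro _; rfl
  | succ c ih =>
    intro a b hc
    rw [PySem.List.pyRange_neg_one_cons (by omega), List.find?_cons]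
    by_cases hp : p a = true
    · simp only [hp, cond_true]
      constructor
      · intro h; cases h
      · intro h; exact absurd (h a (by omega) le_rfl) (by simp [hp])
    · have hp' : p a = false := by simpa using hp
      simp only [hp', cond_false]
      rw [ih (a - 1) b (by omega)]
      constructor
      · intro h t ht1 ht2
        rcases eq_or_lt_of_le ht2 with rfl | hlt
        · exact hp'
        · exact h t ht1 (by omega)
      · intro h t ht1 ht2
        exact h t ht1 (by omega)

theorem findDesc_some (p : Int → Bool) :
    ∀ (c : Nat) (a b : Int), (a - b).toNat = c →
      ∀ j : Int, (PySem.List.pyRange a b (-1)).find? p = some j →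
        b < j ∧ j ≤ a ∧ p j = true ∧ ∀ t : Int, j < t → t ≤ a → p t = false := by
  intro c
  induction c with
  | zero =>
    intro a b hc j hj
    rw [PySem.List.pyRange_neg_one_eq_nil (by omega)] at hj
    simp at hj
  | succ c ih =>
    intro a b hc j hj
    rw [PySem.List.pyRange_neg_one_cons (by omega), List.find?_cons] at hj
    by_cases hp : p a = true
    · simp only [hp, cond_true, Option.some.injEq] at hj
      subst hj
      exact ⟨by omega, le_rfl, hp, fun t ht1 ht2 => by omega⟩
    · have hp' : p a = false := by simpa using hp
      simp only [hp', cond_false] at hj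
      obtain ⟨h1, h2, h3, h4⟩ := ih (a - 1) b (by omega) j hj
      refine ⟨h1, by omega, h3, fun t ht1 ht2 => ?_⟩
      rcases eq_or_lt_of_le ht2 with rfl | hlt
      · exact hp'
      · exact h4 t ht1 (by omega)

theorem loopA_succ (k n : Int) (L : List Int) (fuel : Nat) (e : Int) (istart : Nat) (ans : Int) :
    pylonsLoopA k n L (fuel + 1) e istart ans =
      if e < n - 1 then
        if ((pylonsBisect L (e + k) istart : Nat) : Int) - 1 < 0 then -1
        else if PySem.List.pyGetD L (((pylonsBisect L (e + k) istart : Nat) : Int) - 1) 0 + (k - 1) = e then -1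
        else pylonsLoopA k n L fuel
          (PySem.List.pyGetD L (((pylonsBisect L (e + k) istart : Nat) : Int) - 1) 0 + (k - 1))
          (pylonsBisect L (e + k) istart - 1) (ans + 1)
      else ans := rfl

theorem loopB_succ (k n : Int) (p : Int → Bool) (fuel : Nat) (covered ans : Int) :
    pylonsLoopB k n p (fuel + 1) covered ans =
      if covered < n then
        match (PySem.List.pyRange (min (n - 1) (covered + k - 1)) (max 0 (covered - k + 1) - 1) (-1)).find? p with
        | none => -1
        | some j => pylonsLoopB k n p fuel (j + k) (ans + 1)
      else ans := rfl

theorem pylonsLoop_eq (k n : Int) (p : Int → Bool) (L : List Int)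
    (hL : L.Pairwise (· < ·))
    (hmem : ∀ t : Int, t ∈ L ↔ (0 ≤ t ∧ t < n ∧ p t = true)) :
    ∀ (fuel : Nat) (e : Int) (istart : Nat) (ans : Int),
      ((istart = 0 ∧ e = -1) ∨
        (1 ≤ k ∧ ∃ h : istart < L.length, L[istart] = e - k + 1)) →
      pylonsLoopA k n L fuel e istart ans = pylonsLoopB k n p fuel (e + 1) ans := by
  have hS : ∀ (i j : Nat) (hi : i < L.length) (hj : j < L.length), i < j → L[i] < L[j] :=
    fun i j hi hj hij => List.pairwise_iff_getElem.mp hL i j hi hj hij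
  intro fuel
  induction fuel with
  | zero => intro e istart ans _; rfl
  | succ f ih =>
    intro e istart ans hinv
    by_cases hg : e < n - 1
    · rw [loopA_succ, loopB_succ, if_pos hg, if_pos (show e + 1 < n by omega)]
      -- abbreviations for this step
      set q : Int → Bool := fun v => decide (v ≤ e + k) with hq
      set m : Nat := ((L.drop istart).takeWhile q).length with hm
      have hbis : pylonsBisect L (e + k) istart = istart + m := rfl
      have histLe : istart ≤ L.length := by
        rcases hinv with ⟨hi0, _⟩ | ⟨_, hlt, _⟩
        · omega
        · omega
      have hmBound : istart + m ≤ L.length := by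
        have h1 := tw_len_le q (L.drop istart)
        rw [← hm] at h1
        simp only [List.length_drop] at h1
        omega
      have hup : ∀ (t : Nat) (ht : t < L.length), istart + m ≤ t → e + k < L[t] := by
        intro t ht hge
        by_cases hmlt : m < (L.drop istart).length
        · have hstop := tw_stop' q (L.drop istart) m hm hmlt
          rw [List.getElem_drop] at hstop
          have h1 : e + k < L[istart + m]'(by simp only [List.length_drop] at hmlt; omega) := by
            simpa [hq] using hstop
          rcases Nat.eq_or_lt_of_le hge with heq | hlt
          · subst heq; exact h1
          · exact lt_trans h1 (hS _ _ _ ht hlt)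
        · simp only [List.length_drop] at hmlt; omega
      have hdown : ∀ (i : Nat) (h : i < m), L[istart + i]'(by omega) ≤ e + k := by
        intro i h
        have h2 := tw_getElem q (L.drop istart) i (by rw [← hm]; exact h)
        have h3 : q ((L.drop istart).takeWhile q)[i] = true :=
          List.mem_takeWhile_imp (List.getElem_mem _)
        rw [h2, List.getElem_drop] at h3
        simpa [hq] using h3
      set hiB := min (n - 1) (e + 1 + k - 1) with hhiB
      set loB := max 0 (e + 1 - k + 1) with hloB
      have hiBle1 : hiB ≤ n - 1 := by have := min_le_left (n - 1) (e + 1 + k - 1); omega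
      have hiBle2 : hiB ≤ e + k := by have := min_le_right (n - 1) (e + 1 + k - 1); omega
      have hiB_cases : hiB = n - 1 ∨ hiB = e + k := by
        rcases min_choice (n - 1) (e + 1 + k - 1) with h | h
        · left; omega
        · right; omega
      have loBge0 : 0 ≤ loB := by have := le_max_left 0 (e + 1 - k + 1); omega
      have loBge2 : e - k + 2 ≤ loB := by have := le_max_right 0 (e + 1 - k + 1); omega
      have loB_cases : loB = 0 ∨ loB = e - k + 2 := by
        rcases max_choice 0 (e + 1 - k + 1) with h | h
        · left; omega
        · right; omega
      rcases Nat.eq_zero_or_pos m with hm0 | hmpos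
      · -- m = 0 : bisect found nothing past istart
        rcases hinv with ⟨hi0, he⟩ | ⟨hk1, hlt, heq⟩
        · -- first iteration, and no one-position is ≤ e + k at all: both return -1
          rw [hbis, if_pos (show ((istart + m : Nat) : Int) - 1 < 0 by omega)]
          have hnone : (PySem.List.pyRange hiB (loB - 1) (-1)).find? p = none := by
            rw [findDesc_none_iff p ((hiB - (loB - 1)).toNat) hiB (loB - 1) rfl]
            intro t ht1 ht2
            by_contra hp
            have hpt : p t = true := by simpa using hp
            have htL : t ∈ L := (hmem t).mpr ⟨by omega, by omega, hpt⟩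
            obtain ⟨i, hiL, rfl⟩ := List.mem_iff_getElem.mp htL
            have := hup i hiL (by omega)
            omega
          rw [hnone]
        · -- impossible: the invariant pylon L[istart] itself satisfies the bisect predicate
          exfalso
          have hqist : q (L[istart]'hlt) = true := by
            simp only [hq, decide_eq_true_eq]
            omega
          have hdc : L.drop istart = L[istart]'hlt :: L.drop (istart + 1) :=
            List.drop_eq_getElem_cons hlt
          have h := hm
          rw [hdc, List.takeWhile_cons, if_pos hqist] at h
          simp only [List.length_cons] at h
          omega
      · -- m ≥ 1 : the chosen pylon is L[istart + (m-1)], the largest one-position ≤ e+k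
        have hidx : istart + (m - 1) < L.length := by omega
        have hSle : ∀ (i j : Nat) (hi : i < L.length) (hj : j < L.length),
            i ≤ j → L[i] ≤ L[j] := by
          intro i j hi hj hij
          rcases Nat.eq_or_lt_of_le hij with h | h
          · subst h; exact le_rfl
          · exact le_of_lt (hS i j hi hj h)
        rw [hbis, if_neg (show ¬ (((istart + m : Nat) : Int) - 1 < 0) by omega)]
        have hcast : ((istart + m : Nat) : Int) - 1 = ((istart + (m - 1) : Nat) : Int) := by
          omega
        rw [hcast, PySem.List.pyGetD_natCast, List.getD_eq_getElem L 0 hidx]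
        set val := L[istart + (m - 1)]'hidx with hval
        have hvx : val ≤ e + k := by
          have := hdown (m - 1) (by omega)
          rw [← hval] at this
          exact this
        have hvmem : val ∈ L := by rw [hval]; exact List.getElem_mem _
        obtain ⟨hv0, hvn, hvp⟩ := (hmem val).mp hvmem
        have hmaxe : ∀ t : Int, t ∈ L → t ≤ e + k → t ≤ val := by
          intro t ht htle
          obtain ⟨i, hiL, rfl⟩ := List.mem_iff_getElem.mp ht
          by_cases hcase : istart + m ≤ i
          · have := hup i hiL hcase; omega
          · have := hSle i (istart + (m - 1)) hiL hidx (by omega)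
            rw [← hval] at this
            exact this
        have hk1 : 1 ≤ k := by
          rcases hinv with ⟨hi0, he⟩ | ⟨hk1, _, _⟩
          · omega
          · exact hk1
        by_cases hvlo : loB ≤ val
        · -- the window scan finds exactly val
          have hvhi : val ≤ hiB := by rcases hiB_cases with h | h <;> omega
          have hne : (PySem.List.pyRange hiB (loB - 1) (-1)).find? p ≠ none := by
            intro hnone
            have := (findDesc_none_iff p ((hiB - (loB - 1)).toNat) hiB (loB - 1) rfl).mp
              hnone val (by omega) hvhi
            rw [hvp] at this; cases this
          obtain ⟨j, hj⟩ := Option.ne_none_iff_exists'.mp hne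
          obtain ⟨hj1, hj2, hj3, hj4⟩ := findDesc_some p ((hiB - (loB - 1)).toNat) hiB (loB - 1) rfl j hj
          have hjL : j ∈ L := (hmem j).mpr ⟨by omega, by omega, hj3⟩
          have hjle : j ≤ val := hmaxe j hjL (by omega)
          have hvj : val ≤ j := by
            by_contra hlt
            push_neg at hlt
            have := hj4 val hlt hvhi
            rw [hvp] at this; cases this
          have hjval : j = val := le_antisymm hjle hvj
          rw [hj, hjval]
          rw [if_neg (show ¬ (val + (k - 1) = e) by omega)]
          have harg : (istart + m) - 1 = istart + (m - 1) := by omega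
          rw [harg]
          have hrec := ih (val + (k - 1)) (istart + (m - 1)) (ans + 1)
            (Or.inr ⟨hk1, hidx, by rw [← hval]; ring⟩)
          rw [show val + (k - 1) + 1 = val + k from by ring] at hrec
          exact hrec
        · -- val lies left of the window: A is stuck on the same pylon, B finds nothing
          push_neg at hvlo
          rcases loB_cases with h0 | h2
          · omega
          · rcases hinv with ⟨hi0, he⟩ | ⟨_, hlt, heq⟩
            · omega
            · have hle : L[istart]'hlt ≤ val := by
                have := hSle istart (istart + (m - 1)) hlt hidx (by omega)
                rw [← hval] at this
                exact this
              rw [if_pos (show val + (k - 1) = e by omega)]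
              have hnone : (PySem.List.pyRange hiB (loB - 1) (-1)).find? p = none := by
                rw [findDesc_none_iff p ((hiB - (loB - 1)).toNat) hiB (loB - 1) rfl]
                intro t ht1 ht2
                by_contra hp
                have hpt : p t = true := by simpa using hp
                have htL : t ∈ L := (hmem t).mpr ⟨by omega, by omega, hpt⟩
                have := hmaxe t htL (by omega)
                omega
              rw [hnone]
    · rw [loopA_succ, loopB_succ, if_neg hg, if_neg (show ¬ (e + 1 < n) by omega)]

-- ===== VERDICT (by name: the statement is the Claim_ definition above) =====
theorem pylons_spec : Claim_equal_pylons := by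
  intro k arr _
  unfold Spec_pylons
  show pylons k arr = pylons_alt k arr
  simp only [pylons, pylons_alt]
  rw [PySem.List.foldl_append_ite_eq_filter, List.nil_append]
  have hmain := pylonsLoop_eq k (arr.length : Int)
      (fun t => decide (PySem.List.pyGetD arr t 0 = 1))
      ((PySem.List.pyRange 0 (arr.length : Int) 1).filter
        (fun i => decide (PySem.List.pyGetD arr i 0 = 1)))
      (List.Pairwise.filter _ (PySem.List.pairwise_lt_pyRange_one 0 (arr.length : Int)))
      (by
        intro t
        simp only [List.mem_filter, PySem.List.mem_pyRange_one]
        constructor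
        · rintro ⟨⟨h1, h2⟩, h3⟩; exact ⟨h1, h2, h3⟩
        · rintro ⟨h1, h2, h3⟩; exact ⟨⟨h1, h2⟩, h3⟩)
      (arr.length + 1) (-1) 0 0 (Or.inl ⟨rfl, rfl⟩)
  rw [show (-1 : Int) + 1 = 0 from by ring] at hmain
  exact hmain
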